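-- pv_equiv track=rewrite | github.com/isaacnoya/tfm | moprhgeo/virtual.py | orderTriplesStatic
-- ===== SOURCE A (Python) =====
-- def orderTriplesStatic(ctx, triples) -> list:
--     def count_free_vars(t):
--         return sum(1 for node in t if ctx[node] is None)
--
--     sujeto_min_vars = {}
--     for t in triples:
--         s = t[0]
--         v_count = count_free_vars(t)
--         if s not in sujeto_min_vars or v_count < sujeto_min_vars[s]:
--             sujeto_min_vars[s] = v_count
--
--     triplesOut = sorted(
--         triples,
--         key=lambda t: (
--             sujeto_min_vars[t[0]], # Primero el grupo del sujeto más "prometedor"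
--             t[0],                  # Forzamos que el mismo sujeto esté contiguo
--             count_free_vars(t)     # Dentro del grupo, la más restrictiva primero
--         )
--     )
--
--     return triplesOut
-- ===== SOURCE B (Python) =====
-- def orderTriplesStatic(ctx, triples) -> list:
--     def count_free_vars(t):
--         return sum(1 for node in t if ctx[node] is None)
--
--     subjects = list(dict.fromkeys(t[0] for t in triples))
--     buckets = sorted(
--         (min(count_free_vars(t) for t in triples if t[0] == s), s)
--         for s in subjects
--     )
--     out = []
--     for _, s in buckets:
--         group = [t for t in triples if t[0] == s]
--         group.sort(key=count_free_vars)
--         out.extend(group)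
--     return out
-- ===== Notes on version B (the rewrite author's own statement) =====
-- stated objective: alternative
-- what changed: B replaces A's single global sort under a 3-tuple key (and the min-tracking dict pass) by grouping: dedup the subjects in first-appearance order, compute each subject's minimal free-var count directly from its bucket, sort the (min,subject) bucket list, and concatenate the per-bucket lists each stably sorted by free-var count alone.
import Mathlib
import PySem

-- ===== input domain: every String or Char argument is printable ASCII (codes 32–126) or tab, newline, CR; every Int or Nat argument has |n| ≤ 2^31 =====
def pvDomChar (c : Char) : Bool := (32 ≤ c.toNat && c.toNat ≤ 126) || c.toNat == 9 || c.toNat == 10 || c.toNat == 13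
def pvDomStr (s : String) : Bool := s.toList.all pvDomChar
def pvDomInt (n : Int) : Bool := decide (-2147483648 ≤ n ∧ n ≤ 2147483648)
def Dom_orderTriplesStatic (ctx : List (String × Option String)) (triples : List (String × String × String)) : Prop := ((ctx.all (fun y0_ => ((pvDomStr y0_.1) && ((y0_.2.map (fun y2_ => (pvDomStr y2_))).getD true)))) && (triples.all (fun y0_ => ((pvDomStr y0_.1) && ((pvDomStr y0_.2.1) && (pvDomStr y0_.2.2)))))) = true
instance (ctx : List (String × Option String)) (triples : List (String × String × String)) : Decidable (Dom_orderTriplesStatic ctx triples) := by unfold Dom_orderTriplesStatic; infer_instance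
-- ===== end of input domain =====

-- B regroups the triples per subject (dedup + bucket filters) instead of A's single sort
-- under a 3-tuple key with a min-tracking dict; objective: alternative decomposition.

-- ===== PORT A =====
-- count_free_vars, the inner helper both Pythons define identically
def pvCnt (ctx : List (String × Option String)) (t : String × String × String) : Int :=
  [t.1, t.2.1, t.2.2].foldl
    (fun acc node => if (PySem.Dict.mk ctx).get? node = some none then acc + 1 else acc) 0

-- A's first loop: the dict sujeto_min_vars
def pvMinVars (ctx : List (String × Option String)) (triples : List (String × String × String)) :
    PySem.Dict String Int :=
  triples.foldl
    (fun d t =>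
      if !(d.contains t.1) || decide (pvCnt ctx t < d.getD t.1 0)
      then d.insert t.1 (pvCnt ctx t) else d)
    PySem.Dict.empty

def orderTriplesStatic (ctx : List (String × Option String)) (triples : List (String × String × String)) : List (String × String × String) :=
  let mvd := pvMinVars ctx triples
  PySem.List.sorted2 triples (fun t => toLex (mvd.getD t.1 0, t.1)) (fun t => pvCnt ctx t)

-- ===== PORT B =====
def orderTriplesStatic_alt (ctx : List (String × Option String)) (triples : List (String × String × String)) : List (String × String × String) :=
  let subjects := PySem.List.dedup (triples.map (fun t => t.1))
  let buckets := subjects.map (fun s =>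
    ((PySem.List.min? ((triples.filter (fun t => t.1 == s)).map (pvCnt ctx)) (fun c => c)).getD 0, s))
  let obuckets := PySem.List.sorted2 buckets (fun p => p.1) (fun p => p.2)
  obuckets.foldl
    (fun out p =>
      out ++ PySem.List.sorted (triples.filter (fun t => t.1 == p.2)) (fun t => pvCnt ctx t)) []

-- ===== PRECONDITION & SPEC =====
-- Python's ctx[node] raises KeyError when a triple component is not a key of ctx; Pre_ excludes exactly those inputs.
def Pre_orderTriplesStatic (ctx : List (String × Option String)) (triples : List (String × String × String)) : Prop :=
  ∀ t ∈ triples, t.1 ∈ ctx.map Prod.fst ∧ t.2.1 ∈ ctx.map Prod.fst ∧ t.2.2 ∈ ctx.map Prod.fst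
instance (ctx : List (String × Option String)) (triples : List (String × String × String)) : Decidable (Pre_orderTriplesStatic ctx triples) := by unfold Pre_orderTriplesStatic; infer_instance

def pvWitness_orderTriplesStatic : (List (String × Option String)) × (List (String × String × String)) :=
  ([("a", none), ("b", some "x")], [("a", "b", "b"), ("b", "a", "a"), ("a", "a", "b")])

def Spec_orderTriplesStatic (ctx : List (String × Option String)) (triples : List (String × String × String)) (out : List (String × String × String)) : Prop := out = orderTriplesStatic_alt ctx triples
instance (ctx : List (String × Option String)) (triples : List (String × String × String)) (out : List (String × String × String)) : Decidable (Spec_orderTriplesStatic ctx triples out) := by unfold Spec_orderTriplesStatic; infer_instance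

-- ===== CLAIM (what is proved, stated in full; the proofs are below) =====
def Claim_equal_orderTriplesStatic : Prop := ∀ (ctx : List (String × Option String)) (triples : List (String × String × String)), Dom_orderTriplesStatic ctx triples → Pre_orderTriplesStatic ctx triples → Spec_orderTriplesStatic ctx triples (orderTriplesStatic ctx triples)

-- ===== LEMMAS AND PROOFS =====

-- equation lemmas for insertBy
theorem pv_insertBy_nil {α : Type} (before : α → α → Bool) (x : α) :
    PySem.List.insertBy before x [] = [x] := by
  simp [PySem.List.insertBy]

theorem pv_insertBy_cons {α : Type} (before : α → α → Bool) (x y : α) (ys : List α) :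
    PySem.List.insertBy before x (y :: ys) =
      if before x y then x :: y :: ys else y :: PySem.List.insertBy before x ys := by
  simp [PySem.List.insertBy]

-- STABILITY: inserting x into a key-sorted list appends x at the end of its key class
theorem pv_insertBy_filter {α κ : Type} [LinearOrder κ] (key : α → κ) (x : α) (k : κ) :
    ∀ ys : List α, ys.Pairwise (fun a b => key a ≤ key b) →
    (PySem.List.insertBy (fun a b => decide (key a < key b)) x ys).filter (fun y => decide (key y = k))
      = if key x = k
        then ys.filter (fun y => decide (key y = k)) ++ [x]
        else ys.filter (fun y => decide (key y = k)) := by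
  intro ys
  induction ys with
  | nil =>
    intro _
    rw [pv_insertBy_nil]
    by_cases hk : key x = k <;> simp [hk]
  | cons y t ih =>
    intro h
    rw [List.pairwise_cons] at h
    rw [pv_insertBy_cons]
    by_cases hxy : key x < key y
    · simp only [hxy, decide_true, if_true]
      by_cases hk : key x = k
      · have hnil : (y :: t).filter (fun y => decide (key y = k)) = [] := by
          rw [List.filter_eq_nil_iff]
          intro z hz
          have hyz : key y ≤ key z := by
            rcases List.mem_cons.1 hz with h' | h'
            · exact le_of_eq (congrArg key h'.symm) |>.trans (le_refl _)
            · exact h.1 z h'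
          have : k < key z := lt_of_lt_of_le (hk ▸ hxy) hyz
          simp [ne_of_gt this]
        simp [hk, hnil]
      · simp [hk]
    · simp only [hxy, decide_false, if_false]
      have hrec := ih h.2
      by_cases hy : key y = k <;> by_cases hk : key x = k <;>
        simp [List.filter_cons, hy, hk, hrec]

-- folding insertBy appends each key class in input order
theorem pv_foldl_insertBy_filter {α κ : Type} [LinearOrder κ] (key : α → κ) (k : κ) :
    ∀ (xs acc : List α), acc.Pairwise (fun a b => key a ≤ key b) →
    ((xs.foldl (fun acc x => PySem.List.insertBy (fun a b => decide (key a < key b)) x acc) acc).filter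
        (fun y => decide (key y = k)))
      = acc.filter (fun y => decide (key y = k)) ++ xs.filter (fun x => decide (key x = k)) := by
  intro xs
  induction xs with
  | nil => intro acc _; simp
  | cons x xs ih =>
    intro acc h
    rw [List.foldl_cons, ih _ (PySem.List.insertBy_pairwise_le key x acc h),
        pv_insertBy_filter key x k acc h]
    by_cases hk : key x = k <;> simp [List.filter_cons, hk]

-- stability of PySem's sorted: each key class keeps input order
theorem pv_sorted_filter {α κ : Type} [LinearOrder κ] (xs : List α) (key : α → κ) (k : κ) :
    (PySem.List.sorted xs key).filter (fun y => decide (key y = k))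
      = xs.filter (fun y => decide (key y = k)) := by
  rw [PySem.List.sorted_eq_foldl_insertBy]
  simpa using pv_foldl_insertBy_filter key k xs [] List.Pairwise.nil

-- in a key-sorted list whose keys are all ≥ k, the k-class is a prefix
theorem pv_class_split {α κ : Type} [LinearOrder κ] (key : α → κ) (k : κ) :
    ∀ ys : List α, ys.Pairwise (fun a b => key a ≤ key b) → (∀ y ∈ ys, k ≤ key y) →
    ys.filter (fun y => decide (key y = k)) ++ ys.filter (fun y => !decide (key y = k)) = ys := by
  intro ys
  induction ys with
  | nil => intro _ _; simp
  | cons y t ih =>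
    intro h hmin
    rw [List.pairwise_cons] at h
    by_cases hy : key y = k
    · have := ih h.2 (fun z hz => hmin z (List.mem_cons_of_mem y hz))
      simp [List.filter_cons, hy, this]
    · have hlt : k < key y := lt_of_le_of_ne (hmin y (List.mem_cons_self)) (fun e => hy e.symm)
      have hall : ∀ z ∈ y :: t, key z ≠ k := by
        intro z hz
        rcases List.mem_cons.1 hz with h' | h'
        · subst h'; exact hy
        · exact ne_of_gt (lt_of_lt_of_le hlt (h.1 z h'))
      have h1 : (y :: t).filter (fun y => decide (key y = k)) = [] := by
        rw [List.filter_eq_nil_iff]; intro z hz; simp [hall z hz]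
      have h2 : (y :: t).filter (fun y => !decide (key y = k)) = y :: t := by
        rw [List.filter_eq_self]; intro z hz; simp [hall z hz]
      rw [h1, h2]; rfl

theorem pv_flatMap_congr {α β : Type} {l : List α} {f g : α → List β}
    (h : ∀ a ∈ l, f a = g a) : l.flatMap f = l.flatMap g := by
  induction l with
  | nil => rfl
  | cons a l ih =>
    simp only [List.flatMap_cons]
    rw [h a (List.mem_cons_self), ih (fun b hb => h b (List.mem_cons_of_mem a hb))]

-- a key-sorted list is the concatenation of its key classes, over any strictly
-- increasing key list covering its keys
theorem pv_partition {α κ : Type} [LinearOrder κ] (key : α → κ) :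
    ∀ (ks : List κ) (ys : List α), ys.Pairwise (fun a b => key a ≤ key b) →
      ks.Pairwise (· < ·) → (∀ y ∈ ys, key y ∈ ks) →
      ks.flatMap (fun k => ys.filter (fun y => decide (key y = k))) = ys := by
  intro ks
  induction ks with
  | nil =>
    intro ys _ _ hc
    cases ys with
    | nil => simp
    | cons y t => exact absurd (hc y List.mem_cons_self) (List.not_mem_nil)
  | cons k rest ih =>
    intro ys hys hks hc
    rw [List.pairwise_cons] at hks
    have hmin : ∀ y ∈ ys, k ≤ key y := by
      intro y hy
      rcases List.mem_cons.1 (hc y hy) with h' | h'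
      · exact le_of_eq h'.symm
      · exact le_of_lt (hks.1 _ h')
    have hsplit := pv_class_split key k ys hys hmin
    have hBpair : (ys.filter (fun y => !decide (key y = k))).Pairwise (fun a b => key a ≤ key b) :=
      List.Pairwise.sublist List.filter_sublist hys
    have hBc : ∀ y ∈ ys.filter (fun y => !decide (key y = k)), key y ∈ rest := by
      intro y hy
      have hm := List.mem_filter.1 hy
      have hne : key y ≠ k := by
        have := hm.2; simpa using this
      rcases List.mem_cons.1 (hc y hm.1) with h' | h'
      · exact absurd h' hne
      · exact h'
    have hcls : ∀ k' ∈ rest,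
        ys.filter (fun y => decide (key y = k'))
          = (ys.filter (fun y => !decide (key y = k))).filter (fun y => decide (key y = k')) := by
      intro k' hk'
      have hkk' : k < k' := hks.1 _ hk'
      rw [List.filter_filter]
      apply List.filter_congr
      intro a _
      by_cases h' : key a = k'
      · simp [h', ne_of_gt hkk']
      · simp [h']
    rw [List.flatMap_cons]
    rw [pv_flatMap_congr hcls, ih _ hBpair hks.2 hBc]
    exact hsplit

-- characterization of PySem's stable sort by key classes
theorem pv_sorted_eq_flatMap {α κ : Type} [LinearOrder κ] (xs : List α) (key : α → κ)
    (ks : List κ) (hks : ks.Pairwise (· < ·)) (hcov : ∀ x ∈ xs, key x ∈ ks) :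
    PySem.List.sorted xs key
      = ks.flatMap (fun k => xs.filter (fun x => decide (key x = k))) := by
  have h := pv_partition key ks (PySem.List.sorted xs key)
    (PySem.List.sorted_pairwise xs key) hks
    (fun y hy => hcov y ((PySem.List.mem_sorted xs key false y).1 hy))
  calc PySem.List.sorted xs key
      = ks.flatMap (fun k => (PySem.List.sorted xs key).filter (fun y => decide (key y = k))) :=
        h.symm
    _ = ks.flatMap (fun k => xs.filter (fun x => decide (key x = k))) :=
        pv_flatMap_congr (fun k _ => pv_sorted_filter xs key k)

-- sorted2 is sorted under the lexicographic pair key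
theorem pv_sorted2_eq {α κ₁ κ₂ : Type} [LinearOrder κ₁] [LinearOrder κ₂]
    (xs : List α) (k1 : α → κ₁) (k2 : α → κ₂) :
    PySem.List.sorted2 xs k1 k2 = PySem.List.sorted xs (fun x => toLex (k1 x, k2 x)) := by
  rw [PySem.List.sorted_eq_foldl_insertBy]
  show List.foldl
      (fun acc x => PySem.List.insertBy
        (fun a b => decide (k1 a < k1 b) || (!decide (k1 b < k1 a) && decide (k2 a < k2 b))) x acc)
      [] xs = _
  have hbf : (fun (a b : α) => decide (k1 a < k1 b) || (!decide (k1 b < k1 a) && decide (k2 a < k2 b)))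
      = (fun a b => decide (toLex (k1 a, k2 a) < toLex (k1 b, k2 b))) := by
    funext a b
    rcases lt_trichotomy (k1 a) (k1 b) with h | h | h
    · simp [h, asymm h, Prod.Lex.toLex_lt_toLex]
    · simp [h, lt_irrefl, Prod.Lex.toLex_lt_toLex]
    · simp [asymm h, h, Prod.Lex.toLex_lt_toLex, h.ne']
  rw [hbf]

-- ---- program-specific abbreviations (proof-side names for B's let-bound values) ----
def pvSubj (triples : List (String × String × String)) : List String :=
  PySem.List.dedup (triples.map (fun t => t.1))

def pvBucketL (triples : List (String × String × String)) (s : String) :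
    List (String × String × String) :=
  triples.filter (fun t => t.1 == s)

def pvBMin (ctx : List (String × Option String)) (triples : List (String × String × String))
    (s : String) : Int :=
  (PySem.List.min? ((pvBucketL triples s).map (pvCnt ctx)) (fun c => c)).getD 0

def pvBuckets (ctx : List (String × Option String)) (triples : List (String × String × String)) :
    List (Int × String) :=
  (pvSubj triples).map (fun s => (pvBMin ctx triples s, s))

def pvObuckets (ctx : List (String × Option String)) (triples : List (String × String × String)) :
    List (Int × String) :=
  PySem.List.sorted2 (pvBuckets ctx triples) (fun p => p.1) (fun p => p.2)

def pvKey (ctx : List (String × Option String)) (triples : List (String × String × String))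
    (t : String × String × String) : (Int ×ₗ String) ×ₗ Int :=
  toLex (toLex ((pvMinVars ctx triples).getD t.1 0, t.1), pvCnt ctx t)

def pvCountsOf (ctx : List (String × Option String)) (triples : List (String × String × String))
    (s : String) : List Int :=
  PySem.List.sorted (PySem.Set.ofList ((pvBucketL triples s).map (pvCnt ctx))) (fun c => c)

def pvKsOf (ctx : List (String × Option String)) (triples : List (String × String × String))
    (p : Int × String) : List ((Int ×ₗ String) ×ₗ Int) :=
  (pvCountsOf ctx triples p.2).map (fun c => toLex (toLex (p.1, p.2), c))

def pvKs (ctx : List (String × Option String)) (triples : List (String × String × String)) :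
    List ((Int ×ₗ String) ×ₗ Int) :=
  (pvObuckets ctx triples).flatMap (pvKsOf ctx triples)

-- the dict A builds agrees with B's per-bucket running minimum
def pvOmin (o : Option Int) (v : Int) : Option Int :=
  some (match o with | none => v | some a => min a v)

theorem pv_foldl_omin_some : ∀ (l : List Int) (x : Int),
    l.foldl pvOmin (some x) = some (l.foldl min x) := by
  intro l
  induction l with
  | nil => intro x; rfl
  | cons v l ih => intro x; simpa [pvOmin] using ih (min x v)

theorem pv_minvars_get? (ctx : List (String × Option String)) :
    ∀ (xs : List (String × String × String)) (d : PySem.Dict String Int) (s : String),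
    (xs.foldl
      (fun d t =>
        if !(d.contains t.1) || decide (pvCnt ctx t < d.getD t.1 0)
        then d.insert t.1 (pvCnt ctx t) else d) d).get? s
      = ((xs.filter (fun t => t.1 == s)).map (pvCnt ctx)).foldl pvOmin (d.get? s) := by
  intro xs
  induction xs with
  | nil => intro d s; rfl
  | cons t xs ih =>
    intro d s
    rw [List.foldl_cons]
    by_cases hts : t.1 = s
    · have hstep : ((if !(d.contains t.1) || decide (pvCnt ctx t < d.getD t.1 0)
          then d.insert t.1 (pvCnt ctx t) else d).get? s) = pvOmin (d.get? s) (pvCnt ctx t) := by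
        subst hts
        cases hd : d.get? t.1 with
        | none =>
          have hco : d.contains t.1 = false := by
            rw [PySem.Dict.contains_eq_isSome_get?, hd]; rfl
          simp [hco, PySem.Dict.get?_insert, pvOmin, hd]
        | some a =>
          have hco : d.contains t.1 = true := by
            rw [PySem.Dict.contains_eq_isSome_get?, hd]; rfl
          have hgd : d.getD t.1 0 = a := by
            rw [PySem.Dict.getD_eq_get?_getD, hd]; rfl
          by_cases hlt : pvCnt ctx t < a
          · simp [hco, hgd, hlt, PySem.Dict.get?_insert, pvOmin, hd,
              min_eq_right (le_of_lt hlt)]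
          · simp [hco, hgd, hlt, pvOmin, hd, min_eq_left (not_lt.1 hlt)]
      rw [ih, hstep]
      simp [List.filter_cons, hts]
    · have hstep : ((if !(d.contains t.1) || decide (pvCnt ctx t < d.getD t.1 0)
          then d.insert t.1 (pvCnt ctx t) else d).get? s) = d.get? s := by
        by_cases hcond : (!(d.contains t.1) || decide (pvCnt ctx t < d.getD t.1 0)) = true
        · rw [if_pos hcond, PySem.Dict.get?_insert, if_neg (fun h : s = t.1 => hts h.symm)]
        · rw [if_neg hcond]
      rw [ih, hstep]
      have : (t.1 == s) = false := by simpa using hts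
      simp [List.filter_cons, this]

theorem pv_mv_eq_bmin (ctx : List (String × Option String))
    (triples : List (String × String × String)) (s : String)
    (h : s ∈ triples.map (fun t => t.1)) :
    (pvMinVars ctx triples).getD s 0 = pvBMin ctx triples s := by
  obtain ⟨t, ht, hts⟩ := List.mem_map.1 h
  have htb : t ∈ pvBucketL triples s := by
    rw [pvBucketL, List.mem_filter]
    exact ⟨ht, by simp [hts]⟩
  have hne : (pvBucketL triples s).map (pvCnt ctx) ≠ [] := by
    simp only [ne_eq, List.map_eq_nil_iff]
    exact List.ne_nil_of_mem htb
  obtain ⟨c, l', hl⟩ := List.exists_cons_of_ne_nil hne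
  have hget : (pvMinVars ctx triples).get? s
      = ((pvBucketL triples s).map (pvCnt ctx)).foldl pvOmin none := by
    rw [pvMinVars, pv_minvars_get? ctx triples PySem.Dict.empty s, PySem.Dict.get?_empty]
    rfl
  rw [PySem.Dict.getD_eq_get?_getD, hget, pvBMin, hl]
  show (List.foldl pvOmin (pvOmin none c) l').getD 0 = _
  have h1 : pvOmin none c = some c := rfl
  rw [h1, pv_foldl_omin_some, PySem.List.min?_id_cons]

-- A's port, written as one sorted under the full lexicographic key
theorem pv_A_eq_sorted (ctx : List (String × Option String))
    (triples : List (String × String × String)) :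
    orderTriplesStatic ctx triples = PySem.List.sorted triples (pvKey ctx triples) :=
  pv_sorted2_eq triples
    (fun t => toLex ((pvMinVars ctx triples).getD t.1 0, t.1)) (fun t => pvCnt ctx t)

theorem pv_obuckets_eq (ctx : List (String × Option String))
    (triples : List (String × String × String)) :
    pvObuckets ctx triples
      = PySem.List.sorted (pvBuckets ctx triples) (fun p => toLex p) := by
  rw [pvObuckets, pv_sorted2_eq]

theorem pv_obuckets_pairwise (ctx : List (String × Option String))
    (triples : List (String × String × String)) :
    (pvObuckets ctx triples).Pairwise (fun a b => toLex a < toLex b) := by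
  rw [pv_obuckets_eq]
  have hle := PySem.List.sorted_pairwise (pvBuckets ctx triples) (fun p => toLex p)
  have hnodupB : (pvBuckets ctx triples).Nodup := by
    apply List.Nodup.map
    · intro a b hab
      exact congrArg Prod.snd hab
    · exact PySem.List.nodup_dedup _
  have hnodup : (PySem.List.sorted (pvBuckets ctx triples) (fun p => toLex p)).Nodup :=
    ((PySem.List.sorted_perm (pvBuckets ctx triples) (fun p => toLex p) false).nodup_iff).2 hnodupB
  have := hle.and hnodup
  exact this.imp (fun h => lt_of_le_of_ne h.1 (fun e => h.2 (toLex_inj.1 e)))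

theorem pv_obuckets_mem (ctx : List (String × Option String))
    (triples : List (String × String × String)) (p : Int × String) :
    p ∈ pvObuckets ctx triples ↔ p ∈ pvBuckets ctx triples := by
  rw [pv_obuckets_eq]
  exact PySem.List.mem_sorted _ _ _ _

theorem pv_obuckets_fst (ctx : List (String × Option String))
    (triples : List (String × String × String)) (p : Int × String)
    (hp : p ∈ pvObuckets ctx triples) :
    p.1 = (pvMinVars ctx triples).getD p.2 0 ∧ p.2 ∈ triples.map (fun t => t.1) := by
  rw [pv_obuckets_mem] at hp
  obtain ⟨s, hs, hps⟩ := List.mem_map.1 hp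
  have hsm : s ∈ triples.map (fun t => t.1) := (PySem.List.mem_dedup _ _).1 hs
  refine ⟨?_, ?_⟩
  · rw [← hps]
    exact (pv_mv_eq_bmin ctx triples s hsm).symm
  · rw [← hps]; exact hsm

theorem pv_ks_pairwise (ctx : List (String × Option String))
    (triples : List (String × String × String)) :
    (pvKs ctx triples).Pairwise (· < ·) := by
  rw [pvKs, List.flatMap_def]
  apply List.pairwise_flatten.2
  constructor
  · intro l hl
    obtain ⟨p, hp, rfl⟩ := List.mem_map.1 hl
    rw [pvKsOf]
    apply List.pairwise_map.2
    have hlt := PySem.List.sorted_ofList_pairwise_lt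
      ((pvBucketL triples p.2).map (pvCnt ctx))
    have : (pvCountsOf ctx triples p.2).Pairwise (· < ·) := hlt
    refine List.Pairwise.imp ?_ this
    intro a b h
    exact Prod.Lex.toLex_lt_toLex.2 (Or.inr ⟨rfl, h⟩)
  · apply List.pairwise_map.2
    have hob := pv_obuckets_pairwise ctx triples
    refine hob.imp ?_
    intro a b hab x hx y hy
    rw [pvKsOf] at hx hy
    obtain ⟨ca, _, rfl⟩ := List.mem_map.1 hx
    obtain ⟨cb, _, rfl⟩ := List.mem_map.1 hy
    exact Prod.Lex.toLex_lt_toLex.2 (Or.inl hab)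

theorem pv_ks_cov (ctx : List (String × Option String))
    (triples : List (String × String × String)) :
    ∀ t ∈ triples, pvKey ctx triples t ∈ pvKs ctx triples := by
  intro t ht
  have hsm : t.1 ∈ triples.map (fun t => t.1) := List.mem_map.2 ⟨t, ht, rfl⟩
  have hsub : t.1 ∈ pvSubj triples := (PySem.List.mem_dedup _ _).2 hsm
  have hpB : (pvBMin ctx triples t.1, t.1) ∈ pvBuckets ctx triples :=
    List.mem_map.2 ⟨t.1, hsub, rfl⟩
  have hpO : (pvBMin ctx triples t.1, t.1) ∈ pvObuckets ctx triples :=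
    (pv_obuckets_mem ctx triples _).2 hpB
  have htb : t ∈ pvBucketL triples t.1 := by
    rw [pvBucketL, List.mem_filter]; exact ⟨ht, by simp⟩
  have hcm : pvCnt ctx t ∈ pvCountsOf ctx triples t.1 := by
    rw [pvCountsOf, PySem.List.mem_sorted]
    exact (PySem.Set.mem_ofList _ _).2 (List.mem_map.2 ⟨t, htb, rfl⟩)
  apply List.mem_flatMap.2
  refine ⟨(pvBMin ctx triples t.1, t.1), hpO, ?_⟩
  rw [pvKsOf]
  apply List.mem_map.2
  refine ⟨pvCnt ctx t, hcm, ?_⟩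
  rw [pvKey, pv_mv_eq_bmin ctx triples t.1 hsm]

theorem pv_filter_class (ctx : List (String × Option String))
    (triples : List (String × String × String)) (p : Int × String)
    (hp : p ∈ pvObuckets ctx triples) (c : Int) :
    triples.filter (fun t => decide (pvKey ctx triples t = toLex (toLex (p.1, p.2), c)))
      = (pvBucketL triples p.2).filter (fun t => decide (pvCnt ctx t = c)) := by
  obtain ⟨hp1, _⟩ := pv_obuckets_fst ctx triples p hp
  rw [pvBucketL, List.filter_filter]
  apply List.filter_congr
  intro t _
  by_cases h1 : t.1 = p.2
  · by_cases h2 : pvCnt ctx t = c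
    · have : pvKey ctx triples t = toLex (toLex (p.1, p.2), c) := by
        rw [pvKey, h1, h2, hp1]
      simp [this, h2, h1]
    · have : pvKey ctx triples t ≠ toLex (toLex (p.1, p.2), c) := by
        rw [pvKey]
        intro he
        exact h2 (Prod.ext_iff.1 (toLex_inj.1 he)).2
      simp [this, h2]
  · have : pvKey ctx triples t ≠ toLex (toLex (p.1, p.2), c) := by
      rw [pvKey]
      intro he
      have h3 := toLex_inj.1 (Prod.ext_iff.1 (toLex_inj.1 he)).1
      exact h1 (Prod.ext_iff.1 h3).2
    simp [this, h1]

theorem pv_bucket_sorted (ctx : List (String × Option String))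
    (triples : List (String × String × String)) (s : String) :
    PySem.List.sorted (pvBucketL triples s) (fun t => pvCnt ctx t)
      = (pvCountsOf ctx triples s).flatMap
          (fun c => (pvBucketL triples s).filter (fun t => decide (pvCnt ctx t = c))) := by
  apply pv_sorted_eq_flatMap
  · exact PySem.List.sorted_ofList_pairwise_lt _
  · intro x hx
    rw [pvCountsOf, PySem.List.mem_sorted]
    exact (PySem.Set.mem_ofList _ _).2 (List.mem_map.2 ⟨x, hx, rfl⟩)

theorem pv_B_eq_flatMap (ctx : List (String × Option String))
    (triples : List (String × String × String)) :
    orderTriplesStatic_alt ctx triples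
      = (pvObuckets ctx triples).flatMap
          (fun p => PySem.List.sorted (pvBucketL triples p.2) (fun t => pvCnt ctx t)) := by
  unfold orderTriplesStatic_alt
  rw [PySem.List.foldl_append_eq_flatMap]
  rfl

theorem pv_main (ctx : List (String × Option String))
    (triples : List (String × String × String)) :
    orderTriplesStatic ctx triples = orderTriplesStatic_alt ctx triples := by
  rw [pv_A_eq_sorted, pv_B_eq_flatMap]
  rw [pv_sorted_eq_flatMap triples (pvKey ctx triples) (pvKs ctx triples)
    (pv_ks_pairwise ctx triples) (pv_ks_cov ctx triples)]
  rw [pvKs, List.flatMap_assoc]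
  apply pv_flatMap_congr
  intro p hp
  rw [pvKsOf, List.flatMap_map]
  rw [pv_bucket_sorted ctx triples p.2]
  apply pv_flatMap_congr
  intro c _
  exact pv_filter_class ctx triples p hp c

-- ===== VERDICT (by name: the statement is the Claim_ definition above) =====
theorem orderTriplesStatic_spec : Claim_equal_orderTriplesStatic := by
  intro ctx triples _ _
  unfold Spec_orderTriplesStatic
  exact pv_main ctx triples
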